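-- pv_equiv track=rewrite | github.com/Naxesss/Aiess | bot/logic.py | surround_nonspace
-- ===== SOURCE A (Python) =====
-- def surround_nonspace(string: str, pre: str, post: str) -> str:
--     """Returns the string surrounded by the given characters, maintaining spaces outside the surrounding."""
--     pre_spaces = ""
--     for char in string:
--         if char == " ": pre_spaces += char
--         else:           break
--
--     post_spaces = ""
--     for char in reversed(string):
--         if char == " ": post_spaces += char
--         else:           break
--
--     string = string.strip(" ")
--     return pre_spaces + pre + string + post + post_spaces
-- ===== SOURCE B (Python) =====
-- def surround_nonspace(string: str, pre: str, post: str) -> str: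
--     """Returns the string surrounded by the given characters, maintaining spaces outside the surrounding."""
--     core = string.strip(" ")
--     lead = string[:len(string) - len(string.lstrip(" "))]
--     trail = string[len(string.rstrip(" ")):]
--     return lead + pre + core + post + trail
-- ===== Notes on version B (the rewrite author's own statement) =====
-- stated objective: simpler
-- what changed: Replaces the two explicit character-accumulation loops (forward and reversed, with break) by boundary arithmetic over the built-in lstrip/rstrip: the leading and trailing space runs are slices computed from the stripped lengths.
import Mathlib
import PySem

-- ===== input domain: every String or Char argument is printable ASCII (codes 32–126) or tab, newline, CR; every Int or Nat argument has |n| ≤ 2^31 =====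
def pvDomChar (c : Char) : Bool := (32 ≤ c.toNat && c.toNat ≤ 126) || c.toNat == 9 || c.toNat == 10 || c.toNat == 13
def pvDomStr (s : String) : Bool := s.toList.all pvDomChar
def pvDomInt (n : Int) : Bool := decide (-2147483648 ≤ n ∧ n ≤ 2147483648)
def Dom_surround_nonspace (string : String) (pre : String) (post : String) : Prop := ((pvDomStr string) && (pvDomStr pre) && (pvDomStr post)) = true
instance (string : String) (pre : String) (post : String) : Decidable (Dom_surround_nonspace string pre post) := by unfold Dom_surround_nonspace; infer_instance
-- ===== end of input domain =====

-- B replaces the two accumulation loops by boundary arithmetic over lstrip/rstrip; objective: simpler.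
-- ===== PORT A =====
-- the 'for char in …: if char == " ": acc += char else: break' loop of A (run on string / reversed(string))
def snSpaces : List Char → List Char
  | [] => []
  | c :: rest => if c == ' ' then c :: snSpaces rest else []

def surround_nonspace (string : String) (pre : String) (post : String) : String :=
  let pre_spaces := String.mk (snSpaces string.toList)
  let post_spaces := String.mk (snSpaces string.toList.reverse)
  let s := PySem.Str.stripChars string " "
  pre_spaces ++ pre ++ s ++ post ++ post_spaces

-- ===== PORT B =====
-- lstrip(" ") / rstrip(" ") are ported as dropWhile (· == ' ') from the respective end (exact:
-- Python strips exactly the maximal run of ' ' characters); slices with in-range non-negative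
-- bounds are take/drop.
def surround_nonspace_alt (string : String) (pre : String) (post : String) : String :=
  let cs := string.toList
  let core := PySem.Str.stripChars string " "
  let lead := String.mk (cs.take (cs.length - (cs.dropWhile (· == ' ')).length))
  let trail := String.mk (cs.drop ((cs.reverse.dropWhile (· == ' ')).reverse.length))
  lead ++ pre ++ core ++ post ++ trail

-- ===== PRECONDITION & SPEC =====
def Spec_surround_nonspace (string : String) (pre : String) (post : String) (out : String) : Prop := out = surround_nonspace_alt string pre post
instance (string : String) (pre : String) (post : String) (out : String) : Decidable (Spec_surround_nonspace string pre post out) := by unfold Spec_surround_nonspace; infer_instance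

-- ===== CLAIM (what is proved, stated in full; the proofs are below) =====
def Claim_equal_surround_nonspace : Prop := ∀ (string : String) (pre : String) (post : String), Dom_surround_nonspace string pre post → Spec_surround_nonspace string pre post (surround_nonspace string pre post)

-- ===== LEMMAS AND PROOFS =====

-- ===== VERDICT (by name: the statement is the Claim_ definition above) =====
theorem snSpaces_eq_takeWhile (l : List Char) : snSpaces l = l.takeWhile (· == ' ') := by
  induction l with
  | nil => rfl
  | cons c rest ih =>
    simp only [snSpaces, List.takeWhile_cons]
    split <;> simp_all

theorem take_sub_dropWhile (p : Char → Bool) (l : List Char) :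
    l.take (l.length - (l.dropWhile p).length) = l.takeWhile p := by
  have h : l.length - (l.dropWhile p).length = (l.takeWhile p).length := by
    have h2 := congrArg List.length (List.takeWhile_append_dropWhile (p := p) (l := l))
    simp only [List.length_append] at h2
    omega
  rw [h]
  exact (List.prefix_iff_eq_take.mp (List.takeWhile_prefix p)).symm

theorem drop_rstrip (p : Char → Bool) (l : List Char) :
    l.drop ((l.reverse.dropWhile p).reverse.length) = (l.reverse.takeWhile p).reverse := by
  conv_lhs => rw [show l = (l.reverse.dropWhile p).reverse ++ (l.reverse.takeWhile p).reverse by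
    rw [← List.reverse_append, List.takeWhile_append_dropWhile, List.reverse_reverse]]
  simp

theorem reverse_takeWhile_spaces (l : List Char) :
    (l.takeWhile (· == ' ')).reverse = l.takeWhile (· == ' ') := by
  have h : l.takeWhile (· == ' ') = List.replicate (l.takeWhile (· == ' ')).length ' ' := by
    apply List.eq_replicate_of_mem
    intro b hb
    have := List.mem_takeWhile_imp hb
    simpa using this
  rw [h, List.reverse_replicate]

theorem surround_nonspace_spec : Claim_equal_surround_nonspace := by
  intro string pre post _
  unfold Spec_surround_nonspace surround_nonspace surround_nonspace_alt
  simp only [snSpaces_eq_takeWhile, take_sub_dropWhile, drop_rstrip, reverse_takeWhile_spaces]
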